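-- pv_equiv track=rewrite | github.com/Naromba/Bio-info | Devoir 2/plast.py | extract_kmers
-- ===== SOURCE A (Python) =====
-- def extract_kmers(sequence, seed):
--
--     k = len(seed)               # Longueur du k-mer
--     kmers = []                  # Liste des k-mers extraits
--
--     # Parcourt la séquence pour extraire les k-mers
--     for i in range(len(sequence) - k + 1):
--         kmer = sequence[i:i + k]  # Extrait le k-mer courant
--
--         # Vérifie si le k-mer respecte la graine
--         valid = True
--         for j in range(k):
--             if seed[j] == '1':
--                 # vérifie si le caractère est valide
--                 if kmer[j] not in 'ACGT':
--                     valid = False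
--                     break
--             # '0' : don't care, on ne fait rien
--
--         if valid:
--             kmers.append((i, kmer))    # Ajoute le k-mer valide à la liste
--
--     return kmers
-- ===== SOURCE B (Python) =====
-- def extract_kmers(sequence, seed):
--     k = len(seed)
--     n = len(sequence)
--     # offsets the seed cares about
--     ones = [j for j, c in enumerate(seed) if c == '1']
--     # scatter pass: each non-ACGT character invalidates every window covering it at a '1' offset
--     bad = set()
--     for p, c in enumerate(sequence):
--         if c not in 'ACGT':
--             for j in ones:
--                 i = p - j
--                 if 0 <= i <= n - k:
--                     bad.add(i)
--     return [(i, sequence[i:i + k]) for i in range(n - k + 1) if i not in bad]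
-- ===== Notes on version B (the rewrite author's own statement) =====
-- stated objective: alternative
-- what changed: Replaces per-window validation (re-checking every '1' offset of every window) by a scatter pass: the '1' offsets and the non-ACGT positions are computed once and each offending character marks the window starts it invalidates in a set; a final scan emits the windows not marked.
import Mathlib
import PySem

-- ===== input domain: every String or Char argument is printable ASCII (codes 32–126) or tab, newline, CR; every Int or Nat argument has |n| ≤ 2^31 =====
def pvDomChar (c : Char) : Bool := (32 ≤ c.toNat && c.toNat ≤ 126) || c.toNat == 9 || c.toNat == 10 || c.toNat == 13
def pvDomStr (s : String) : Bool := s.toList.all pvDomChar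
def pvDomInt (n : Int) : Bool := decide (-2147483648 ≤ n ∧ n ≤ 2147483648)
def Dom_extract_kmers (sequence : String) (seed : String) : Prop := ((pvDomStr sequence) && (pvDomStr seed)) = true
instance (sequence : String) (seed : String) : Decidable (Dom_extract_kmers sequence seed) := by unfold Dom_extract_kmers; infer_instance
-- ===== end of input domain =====

-- B replaces A's per-window re-validation by a one-time scatter pass: each non-ACGT character
-- marks the window starts it invalidates at a '1' seed offset; objective: alternative algorithm.

-- ===== PORT A =====
-- port of the single-char membership test `c in 'ACGT'`
def pvInACGT (c : Char) : Bool := c == 'A' || c == 'C' || c == 'G' || c == 'T'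

-- A's inner `for j in range(k)` loop with its break, as structural recursion over the j's
def pvValidLoop (seedL kmerL : List Char) : List Int → Bool
  | [] => true
  | j :: js =>
    if PySem.List.pyGetD seedL j ' ' == '1' then
      -- indices j are always in range here, so the total pyGetD is exact
      if pvInACGT (PySem.List.pyGetD kmerL j ' ') then pvValidLoop seedL kmerL js else false
    else pvValidLoop seedL kmerL js

def extract_kmers (sequence : String) (seed : String) : List (Int × String) :=
  let k := PySem.Str.len seed
  (PySem.List.pyRange 0 (PySem.Str.len sequence - k + 1) 1).foldl
    (fun kmers i =>
      let kmer := PySem.Str.slice sequence (some i) (some (i + k))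
      if pvValidLoop seed.toList kmer.toList (PySem.List.pyRange 0 k 1) then
        kmers ++ [(i, kmer)]
      else kmers) []

-- ===== PORT B =====
-- `ones = [j for j, c in enumerate(seed) if c == '1']`
def pvOnes (seed : String) : List Int :=
  (PySem.List.enumerate seed.toList 0).filterMap (fun p => if p.2 == '1' then some p.1 else none)

-- the scatter pass building the `bad` set
def pvBad (sequence : String) (seed : String) : PySem.Set Int :=
  let n := PySem.Str.len sequence
  let k := PySem.Str.len seed
  (PySem.List.enumerate sequence.toList 0).foldl
    (fun s pc =>
      if pvInACGT pc.2 then s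
      else (pvOnes seed).foldl
        (fun s j => if 0 ≤ pc.1 - j ∧ pc.1 - j ≤ n - k then PySem.Set.add s (pc.1 - j) else s)
        s)
    PySem.Set.empty

def extract_kmers_alt (sequence : String) (seed : String) : List (Int × String) :=
  let n := PySem.Str.len sequence
  let k := PySem.Str.len seed
  let bad := pvBad sequence seed
  (PySem.List.pyRange 0 (n - k + 1) 1).foldl
    (fun acc i =>
      if PySem.Set.contains bad i then acc
      else acc ++ [(i, PySem.Str.slice sequence (some i) (some (i + k)))]) []

-- ===== PRECONDITION & SPEC =====
def Spec_extract_kmers (sequence : String) (seed : String) (out : List (Int × String)) : Prop := out = extract_kmers_alt sequence seed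
instance (sequence : String) (seed : String) (out : List (Int × String)) : Decidable (Spec_extract_kmers sequence seed out) := by unfold Spec_extract_kmers; infer_instance

-- ===== CLAIM (what is proved, stated in full; the proofs are below) =====
def Claim_equal_extract_kmers : Prop := ∀ (sequence : String) (seed : String), Dom_extract_kmers sequence seed → Spec_extract_kmers sequence seed (extract_kmers sequence seed)

-- ===== LEMMAS AND PROOFS =====

-- A's inner loop succeeds iff every listed '1' offset carries an ACGT character
lemma pvValidLoop_iff (seedL kmerL : List Char) (js : List Int) :
    pvValidLoop seedL kmerL js = true ↔
      ∀ j ∈ js, PySem.List.pyGetD seedL j ' ' = '1' → pvInACGT (PySem.List.pyGetD kmerL j ' ') = true := by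
  induction js with
  | nil => simp [pvValidLoop]
  | cons j js ih =>
    simp only [pvValidLoop]
    split_ifs with h1 h2 <;> simp_all

-- membership in the inner marking fold
lemma mem_inner_fold (n k p : Int) (js : List Int) (s : PySem.Set Int) (x : Int) :
    x ∈ js.foldl (fun s j => if 0 ≤ p - j ∧ p - j ≤ n - k then PySem.Set.add s (p - j) else s) s ↔
      x ∈ s ∨ ∃ j ∈ js, x = p - j ∧ 0 ≤ p - j ∧ p - j ≤ n - k := by
  induction js generalizing s with
  | nil => simp
  | cons j js ih =>
    simp only [List.foldl_cons]
    split_ifs with h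
    · rw [ih]
      simp only [PySem.Set.mem_add, List.mem_cons]
      constructor
      · rintro (((hs | rfl) | ⟨j', hj', hrest⟩))
        · exact Or.inl hs
        · exact Or.inr ⟨j, Or.inl rfl, rfl, h⟩
        · exact Or.inr ⟨j', Or.inr hj', hrest⟩
      · rintro (hs | ⟨j', (rfl | hj'), hrest⟩)
        · exact Or.inl (Or.inl hs)
        · exact Or.inl (Or.inr hrest.1)
        · exact Or.inr ⟨j', hj', hrest⟩
    · rw [ih]
      simp only [List.mem_cons]
      constructor
      · rintro (hs | ⟨j', hj', hrest⟩)
        · exact Or.inl hs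
        · exact Or.inr ⟨j', Or.inr hj', hrest⟩
      · rintro (hs | ⟨j', (rfl | hj'), hrest⟩)
        · exact Or.inl hs
        · exact absurd hrest.2 h
        · exact Or.inr ⟨j', hj', hrest⟩

-- membership in the outer marking fold
lemma mem_outer_fold (n k : Int) (seed : String) (l : List (Int × Char)) (s : PySem.Set Int) (x : Int) :
    x ∈ l.foldl
        (fun s pc =>
          if pvInACGT pc.2 then s
          else (pvOnes seed).foldl
            (fun s j => if 0 ≤ pc.1 - j ∧ pc.1 - j ≤ n - k then PySem.Set.add s (pc.1 - j) else s)
            s)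
        s ↔
      x ∈ s ∨ ∃ pc ∈ l, pvInACGT pc.2 = false ∧
        ∃ j ∈ pvOnes seed, x = pc.1 - j ∧ 0 ≤ pc.1 - j ∧ pc.1 - j ≤ n - k := by
  induction l generalizing s with
  | nil => simp
  | cons pc l ih =>
    simp only [List.foldl_cons]
    split_ifs with h
    · rw [ih]
      simp only [List.mem_cons]
      constructor
      · rintro (hs | ⟨pc', hpc', hrest⟩)
        · exact Or.inl hs
        · exact Or.inr ⟨pc', Or.inr hpc', hrest⟩
      · rintro (hs | ⟨pc', (rfl | hpc'), hrest⟩)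
        · exact Or.inl hs
        · exact absurd h (by simp [hrest.1])
        · exact Or.inr ⟨pc', hpc', hrest⟩
    · rw [ih, mem_inner_fold]
      simp only [List.mem_cons]
      constructor
      · rintro ((hs | ⟨j', hj', hrest⟩) | ⟨pc', hpc', hrest⟩)
        · exact Or.inl hs
        · exact Or.inr ⟨pc, Or.inl rfl, by simpa using h, j', hj', hrest⟩
        · exact Or.inr ⟨pc', Or.inr hpc', hrest⟩
      · rintro (hs | ⟨pc', (rfl | hpc'), hbadc, j', hj', hrest⟩)
        · exact Or.inl (Or.inl hs)
        · exact Or.inl (Or.inr ⟨j', hj', hrest⟩)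
        · exact Or.inr ⟨pc', hpc', hbadc, j', hj', hrest⟩

lemma mem_pvOnes (seed : String) (j : Int) :
    j ∈ pvOnes seed ↔ ∃ (jn : Nat) (h : jn < seed.toList.length), j = jn ∧ seed.toList[jn] = '1' := by
  unfold pvOnes
  simp only [List.mem_filterMap, PySem.List.mem_enumerate_iff]
  constructor
  · rintro ⟨p, ⟨k, hk, rfl⟩, hp⟩
    simp only [zero_add] at hp ⊢
    split_ifs at hp with h
    · exact ⟨k, hk, by simpa using hp.symm, by simpa using h⟩
  · rintro ⟨jn, h, rfl, h1⟩
    exact ⟨((jn : Int), seed.toList[jn]), ⟨jn, h, by simp⟩, by simp [h1]⟩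

-- the k-mer slice reads the sequence at offset i + j
lemma kmer_getD (sequence : String) (i : Int) (k : Int) (j : Int)
    (hi : 0 ≤ i) (hj : 0 ≤ j) (hjk : j < k) :
    PySem.List.pyGetD (PySem.Str.slice sequence (some i) (some (i + k))).toList j ' '
      = PySem.List.pyGetD sequence.toList (i + j) ' ' := by
  have hik : 0 ≤ i + k := by omega
  have hslice : (PySem.Str.slice sequence (some i) (some (i + k))).toList
      = List.take ((i + k).toNat - i.toNat) (List.drop i.toNat sequence.toList) := by
    simp [PySem.Str.slice]
    rw [PySem.List.slice_toNat _ hi hik]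
  rw [hslice, PySem.List.pyGetD_of_nonneg _ _ hj, PySem.List.pyGetD_of_nonneg _ _ (by omega)]
  have hjlt : j.toNat < (i + k).toNat - i.toNat := by omega
  simp only [List.getD_eq_getElem?_getD, List.getElem?_take, if_pos hjlt, List.getElem?_drop]
  congr 2
  omega

-- seed lookup at an in-range offset
lemma seed_getD (seed : String) (j : Int) (hj : 0 ≤ j) :
    PySem.List.pyGetD seed.toList j ' ' = seed.toList.getD j.toNat ' ' :=
  PySem.List.pyGetD_of_nonneg _ _ hj

-- the central pointwise fact: on every window start in range, A's validity test
-- is the complement of membership in B's bad set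
lemma valid_eq_not_bad (sequence seed : String) (i : Int)
    (hi : 0 ≤ i) (hin : i ≤ PySem.Str.len sequence - PySem.Str.len seed) :
    pvValidLoop seed.toList
        (PySem.Str.slice sequence (some i) (some (i + PySem.Str.len seed))).toList
        (PySem.List.pyRange 0 (PySem.Str.len seed) 1)
      = !(PySem.Set.contains (pvBad sequence seed) i) := by
  set n := PySem.Str.len sequence with hn
  set k := PySem.Str.len seed with hk
  have hnval : n = (sequence.toList.length : Int) := by simp [hn]
  have hkval : k = (seed.toList.length : Int) := by simp [hk]
  have hbad : i ∈ pvBad sequence seed ↔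
      ∃ j ∈ pvOnes seed, 0 ≤ j ∧ j < k ∧
        pvInACGT (PySem.List.pyGetD sequence.toList (i + j) ' ') = false := by
    unfold pvBad
    rw [mem_outer_fold]
    simp only [PySem.Set.empty, List.not_mem_nil, false_or]
    constructor
    · rintro ⟨pc, hpc, hbadc, j, hj, hx, hge, hle⟩
      rcases (PySem.List.mem_enumerate_iff _ _ _).1 hpc with ⟨pn, hpn, rfl⟩
      simp only [zero_add] at hbadc hx hge hle ⊢
      rcases (mem_pvOnes seed j).1 hj with ⟨jn, hjn, rfl, _⟩
      refine ⟨(jn : Int), hj, by positivity, by omega, ?_⟩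
      have : i + (jn : Int) = (pn : Int) := by omega
      rw [this, PySem.List.pyGetD_of_nonneg _ _ (by positivity)]
      simpa [List.getD_eq_getElem?_getD, List.getElem?_eq_getElem hpn] using hbadc
    · rintro ⟨j, hj, hj0, hjk, hbadc⟩
      have hplt : (i + j).toNat < sequence.toList.length := by omega
      refine ⟨(((i + j).toNat : Int), sequence.toList[(i + j).toNat]),
        (PySem.List.mem_enumerate_iff _ _ _).2 ⟨(i + j).toNat, hplt, by simp⟩, ?_, j, hj, by omega, by omega, by omega⟩
      rw [PySem.List.pyGetD_of_nonneg _ _ (by omega)] at hbadc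
      simpa [List.getD_eq_getElem?_getD, List.getElem?_eq_getElem hplt] using hbadc
  have hvalid : pvValidLoop seed.toList
      (PySem.Str.slice sequence (some i) (some (i + k))).toList
      (PySem.List.pyRange 0 k 1) = true ↔ ¬ i ∈ pvBad sequence seed := by
    rw [pvValidLoop_iff, hbad]
    push Not
    constructor
    · rintro h j hj hj0 hjk
      rcases (mem_pvOnes seed j).1 hj with ⟨jn, hjn, rfl, hone⟩
      have hmem : (jn : Int) ∈ PySem.List.pyRange 0 k 1 := by
        rw [PySem.List.mem_pyRange_one]; omega
      have := h _ hmem (by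
        rw [seed_getD _ _ (by positivity)]
        simpa [List.getD_eq_getElem?_getD, List.getElem?_eq_getElem hjn] using hone)
      rw [kmer_getD sequence i k _ hi hj0 hjk] at this
      simp [this]
    · intro h j hjmem hone
      rw [PySem.List.mem_pyRange_one] at hjmem
      rw [kmer_getD sequence i k j hi hjmem.1 hjmem.2]
      by_contra hbadj
      have hjones : j ∈ pvOnes seed := by
        rw [mem_pvOnes]
        have hjn : j.toNat < seed.toList.length := by omega
        refine ⟨j.toNat, hjn, by omega, ?_⟩
        rw [seed_getD _ _ hjmem.1] at hone
        simpa [List.getD_eq_getElem?_getD, List.getElem?_eq_getElem hjn] using hone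
      have := h j hjones hjmem.1 hjmem.2
      simp only [Bool.not_eq_true] at hbadj
      exact this hbadj
  cases hc : PySem.Set.contains (pvBad sequence seed) i with
  | true =>
    simp only [Bool.not_true]
    by_contra hv
    exact (hvalid.1 (by simpa using hv)) ((PySem.Set.contains_iff _ _).1 hc)
  | false =>
    simp only [Bool.not_false]
    refine hvalid.2 (fun hm => ?_)
    rw [(PySem.Set.contains_iff _ _).2 hm] at hc
    cases hc

-- B's loop has the branches in the opposite order; swap them
lemma alt_step_eq (bad : PySem.Set Int) (f : Int → Int × String) :
    (fun (acc : List (Int × String)) i =>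
        if PySem.Set.contains bad i then acc else acc ++ [f i])
      = (fun acc i => if !(PySem.Set.contains bad i) then acc ++ [f i] else acc) := by
  funext acc i
  cases PySem.Set.contains bad i <;> simp

-- ===== VERDICT (by name: the statement is the Claim_ definition above) =====
theorem extract_kmers_spec : Claim_equal_extract_kmers := by
  intro sequence seed _
  unfold Spec_extract_kmers extract_kmers extract_kmers_alt
  simp only
  rw [alt_step_eq, PySem.List.foldl_append_if, PySem.List.foldl_append_if]
  simp only [List.nil_append]
  congr 1
  apply List.filter_congr
  intro i hi
  rw [PySem.List.mem_pyRange_one] at hi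
  exact valid_eq_not_bad sequence seed i hi.1 (by omega)
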